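-- pv_equiv track=rewrite | github.com/ccrawford/CC_ISIS | CC_G5/Scripts/generate_font.py | parse_char_ranges
-- ===== SOURCE A (Python) =====
-- def parse_char_ranges(range_str):
--     """
--     Parse a range string like "32-126,167,169,176" into a sorted list of codepoints.
--     Supports:
--       - Single values: 167
--       - Ranges: 32-126
--       - Mixed: 32-126,167,169,176-180
--     """
--     codepoints = set()
--     for part in range_str.split(","):
--         part = part.strip()
--         if "-" in part:
--             start, end = part.split("-", 1)
--             codepoints.update(range(int(start), int(end) + 1))
--         else:
--             codepoints.add(int(part))
--     return sorted(codepoints)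
-- ===== SOURCE B (Python) =====
-- def parse_char_ranges(range_str):
--     intervals = []
--     for part in range_str.split(","):
--         part = part.strip()
--         if "-" in part:
--             a, b = part.split("-", 1)
--             intervals.append((int(a), int(b)))
--         else:
--             v = int(part)
--             intervals.append((v, v))
--     intervals.sort(key=lambda t: t[0])
--     merged = []
--     for a, b in intervals:
--         if a > b:
--             continue
--         if merged and a <= merged[-1][1] + 1:
--             if b > merged[-1][1]:
--                 merged[-1] = (merged[-1][0], b)
--         else:
--             merged.append((a, b))
--     result = []
--     for a, b in merged:
--         result.extend(range(a, b + 1))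
--     return result
-- ===== Notes on version B (the rewrite author's own statement) =====
-- stated objective: alternative
-- what changed: B never builds a global set of points: it parses each comma-part into an interval (v,v) or (a,b), sorts the interval list by start, merges overlapping/adjacent intervals in one sweep, and expands the merged intervals in order, so no point-set and no final point-sort are needed.
import Mathlib
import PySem

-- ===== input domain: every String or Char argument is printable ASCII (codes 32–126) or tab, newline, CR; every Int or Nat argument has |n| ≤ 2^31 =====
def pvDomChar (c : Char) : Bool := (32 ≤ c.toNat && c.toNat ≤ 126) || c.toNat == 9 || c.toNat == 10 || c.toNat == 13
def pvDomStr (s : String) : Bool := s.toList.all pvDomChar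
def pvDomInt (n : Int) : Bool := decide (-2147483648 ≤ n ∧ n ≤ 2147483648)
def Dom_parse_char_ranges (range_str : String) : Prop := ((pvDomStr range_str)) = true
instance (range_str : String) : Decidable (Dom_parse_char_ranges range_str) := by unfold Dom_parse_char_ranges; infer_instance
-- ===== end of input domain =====

-- B replaces A's global point-set + final sort by parse-intervals / sort-by-start / merge / expand (alternative algorithm, same results).

-- ===== PORT A =====
def parse_char_ranges (range_str : String) : List Int :=
  let codepoints :=
    ((PySem.Str.split? range_str ",").getD []).foldl (fun cps part0 =>
      let part := PySem.Str.strip part0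
      if PySem.Str.isIn "-" part then
        let pcs := (PySem.Str.splitMax? part "-" 1).getD []
        let start := (PySem.Int.ofStr? (pcs.getD 0 "")).getD 0
        let stop := (PySem.Int.ofStr? (pcs.getD 1 "")).getD 0
        PySem.Set.update cps (PySem.List.pyRange start (stop + 1) 1)
      else
        PySem.Set.add cps ((PySem.Int.ofStr? part).getD 0))
      PySem.Set.empty
  PySem.List.sorted codepoints (fun x => x) false

-- ===== PORT B =====
-- parse each comma-part into an interval
def pcrParse (range_str : String) : List (Int × Int) :=
  ((PySem.Str.split? range_str ",").getD []).foldl (fun acc part0 =>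
    let part := PySem.Str.strip part0
    if PySem.Str.isIn "-" part then
      let pcs := (PySem.Str.splitMax? part "-" 1).getD []
      acc ++ [((PySem.Int.ofStr? (pcs.getD 0 "")).getD 0,
               (PySem.Int.ofStr? (pcs.getD 1 "")).getD 0)]
    else
      let v := (PySem.Int.ofStr? part).getD 0
      acc ++ [(v, v)]) []

-- one merge step (Python mutates merged[-1]; here: dropLast ++ [replacement])
def pcrStep (merged : List (Int × Int)) (p : Int × Int) : List (Int × Int) :=
  if p.2 < p.1 then merged
  else
    match merged.getLast? with
    | some (la, lb) =>
        if p.1 ≤ lb + 1 then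
          if lb < p.2 then merged.dropLast ++ [(la, p.2)] else merged
        else merged ++ [p]
    | none => [p]

def parse_char_ranges_alt (range_str : String) : List Int :=
  let intervals := PySem.List.sorted (pcrParse range_str) (fun t => t.1) false
  let merged := intervals.foldl pcrStep []
  merged.foldl (fun res p => res ++ PySem.List.pyRange p.1 (p.2 + 1) 1) []

-- ===== PRECONDITION & SPEC =====
-- Pre_: every comma-part parses (the range endpoints resp. the single value are valid int() literals);
-- exactly on these inputs Python A returns instead of raising ValueError.
def Pre_parse_char_ranges (range_str : String) : Prop :=
  (((PySem.Str.split? range_str ",").getD []).all (fun part0 =>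
    let part := PySem.Str.strip part0
    if PySem.Str.isIn "-" part then
      ((PySem.Str.splitMax? part "-" 1).getD []).all (fun s => (PySem.Int.ofStr? s).isSome)
    else
      (PySem.Int.ofStr? part).isSome)) = true
instance (range_str : String) : Decidable (Pre_parse_char_ranges range_str) := by
  unfold Pre_parse_char_ranges; infer_instance

def pvWitness_parse_char_ranges : String := "32-40,167, 169 ,36-34,176-180"

def Spec_parse_char_ranges (range_str : String) (out : List Int) : Prop := out = parse_char_ranges_alt range_str
instance (range_str : String) (out : List Int) : Decidable (Spec_parse_char_ranges range_str out) := by unfold Spec_parse_char_ranges; infer_instance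

-- ===== CLAIM (what is proved, stated in full; the proofs are below) =====
def Claim_equal_parse_char_ranges : Prop := ∀ (range_str : String), Dom_parse_char_ranges range_str → Pre_parse_char_ranges range_str → Spec_parse_char_ranges range_str (parse_char_ranges range_str)



-- ===== LEMMAS AND PROOFS =====

-- the interval a single comma-part denotes
def ivOf (part0 : String) : Int × Int :=
  let part := PySem.Str.strip part0
  if PySem.Str.isIn "-" part then
    let pcs := (PySem.Str.splitMax? part "-" 1).getD []
    ((PySem.Int.ofStr? (pcs.getD 0 "")).getD 0,
     (PySem.Int.ofStr? (pcs.getD 1 "")).getD 0)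
  else
    let v := (PySem.Int.ofStr? part).getD 0
    (v, v)

def pcrCover (l : List (Int × Int)) (x : Int) : Prop := ∃ p ∈ l, p.1 ≤ x ∧ x ≤ p.2

-- A's loop body, named (definitionally the lambda inside parse_char_ranges)
def stepA (cps : PySem.Set Int) (part0 : String) : PySem.Set Int :=
  let part := PySem.Str.strip part0
  if PySem.Str.isIn "-" part then
    let pcs := (PySem.Str.splitMax? part "-" 1).getD []
    let start := (PySem.Int.ofStr? (pcs.getD 0 "")).getD 0
    let stop := (PySem.Int.ofStr? (pcs.getD 1 "")).getD 0
    PySem.Set.update cps (PySem.List.pyRange start (stop + 1) 1)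
  else
    PySem.Set.add cps ((PySem.Int.ofStr? part).getD 0)

-- B's parse-loop body, named
def stepP (acc : List (Int × Int)) (part0 : String) : List (Int × Int) :=
  let part := PySem.Str.strip part0
  if PySem.Str.isIn "-" part then
    let pcs := (PySem.Str.splitMax? part "-" 1).getD []
    acc ++ [((PySem.Int.ofStr? (pcs.getD 0 "")).getD 0,
             (PySem.Int.ofStr? (pcs.getD 1 "")).getD 0)]
  else
    let v := (PySem.Int.ofStr? part).getD 0
    acc ++ [(v, v)]

theorem stepP_eq (acc : List (Int × Int)) (part0 : String) :
    stepP acc part0 = acc ++ [ivOf part0] := by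
  simp only [stepP, ivOf]
  split <;> simp [*]

theorem pcrParse_eq_map (s : String) :
    pcrParse s = ((PySem.Str.split? s ",").getD []).map ivOf := by
  have aux : ∀ (l : List String) (acc : List (Int × Int)),
      l.foldl stepP acc = acc ++ l.map ivOf := by
    intro l
    induction l with
    | nil => simp
    | cons h t ih => intro acc; rw [List.foldl_cons, stepP_eq, ih]; simp
  simpa using aux ((PySem.Str.split? s ",").getD []) []

theorem mem_stepA (cps : PySem.Set Int) (part0 : String) (x : Int) :
    x ∈ stepA cps part0 ↔ x ∈ cps ∨ ((ivOf part0).1 ≤ x ∧ x ≤ (ivOf part0).2) := by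
  simp only [stepA, ivOf]
  split
  · simp only [PySem.Set.mem_update, PySem.List.mem_pyRange_one, Int.lt_add_one_iff]
  · simp only [PySem.Set.mem_add, le_antisymm_iff, and_comm]

theorem nodup_stepA (cps : PySem.Set Int) (part0 : String) (h : cps.Nodup) :
    (stepA cps part0).Nodup := by
  simp only [stepA]
  split
  · exact PySem.Set.nodup_update _ _ h
  · exact PySem.Set.nodup_add _ _ h

theorem aset_mem (l : List String) (acc : PySem.Set Int) (x : Int) :
    x ∈ l.foldl stepA acc ↔ x ∈ acc ∨ ∃ part ∈ l, (ivOf part).1 ≤ x ∧ x ≤ (ivOf part).2 := by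
  induction l generalizing acc with
  | nil => simp
  | cons h t ih =>
      rw [List.foldl_cons, ih, mem_stepA]
      simp only [List.mem_cons]
      constructor
      · rintro ((hx | hc) | ⟨p, hp, hc⟩)
        · exact Or.inl hx
        · exact Or.inr ⟨h, Or.inl rfl, hc⟩
        · exact Or.inr ⟨p, Or.inr hp, hc⟩
      · rintro (hx | ⟨p, (rfl | hp), hc⟩)
        · exact Or.inl (Or.inl hx)
        · exact Or.inl (Or.inr hc)
        · exact Or.inr ⟨p, hp, hc⟩

theorem aset_nodup (l : List String) (acc : PySem.Set Int) (hacc : acc.Nodup) :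
    (l.foldl stepA acc).Nodup := by
  induction l generalizing acc with
  | nil => simpa
  | cons h t ih => exact ih _ (nodup_stepA _ _ hacc)

-- ===== merge sweep =====

theorem merge_inv (l : List (Int × Int)) : ∀ (m : List (Int × Int)),
    (∀ p ∈ m, p.1 ≤ p.2) →
    m.Pairwise (fun p q => p.2 + 1 < q.1) →
    (∀ q ∈ l, ∀ p ∈ m, p.1 ≤ q.1) →
    l.Pairwise (fun p q => p.1 ≤ q.1) →
    (∀ p ∈ l.foldl pcrStep m, p.1 ≤ p.2) ∧
    (l.foldl pcrStep m).Pairwise (fun p q => p.2 + 1 < q.1) ∧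
    (∀ x, pcrCover (l.foldl pcrStep m) x ↔ pcrCover m x ∨ ∃ q ∈ l, q.1 ≤ x ∧ x ≤ q.2) := by
  induction l with
  | nil => intro m h1 h2 _ _; exact ⟨h1, h2, by simp [pcrCover]⟩
  | cons q t ih =>
      intro m h1 h2 hstart hsorted
      have hsorted_t : t.Pairwise (fun p q => p.1 ≤ q.1) := hsorted.of_cons
      have hq_le : ∀ r ∈ t, q.1 ≤ r.1 := by
        intro r hr; exact List.rel_of_pairwise_cons hsorted hr
      simp only [List.foldl_cons]
      by_cases hemp : q.2 < q.1
      · -- empty interval: skipped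
        have hstep : pcrStep m q = m := by simp [pcrStep, hemp]
        rw [hstep]
        obtain ⟨g1, g2, g3⟩ := ih m h1 h2 (fun r hr p hp => hstart r (List.mem_cons_of_mem _ hr) p hp) hsorted_t
        refine ⟨g1, g2, fun x => ?_⟩
        rw [g3 x]
        constructor
        · rintro (h | h)
          · exact Or.inl h
          · obtain ⟨r, hr, hc⟩ := h; exact Or.inr ⟨r, List.mem_cons_of_mem _ hr, hc⟩
        · rintro (h | ⟨r, hr, hc⟩)
          · exact Or.inl h
          · rcases List.mem_cons.mp hr with rfl | hr
            · omega
            · exact Or.inr ⟨r, hr, hc⟩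
      · rw [not_lt] at hemp
        rcases List.eq_nil_or_concat m with rfl | ⟨init, lastp, hm⟩
        · -- m empty: start a new run
          have hstep : pcrStep [] q = [q] := by
            simp [pcrStep, show ¬ (q.2 < q.1) by omega]
          rw [hstep]
          have hm1 : ∀ p ∈ [q], p.1 ≤ p.2 := by simpa using hemp
          have hm2 : ([q] : List (Int × Int)).Pairwise (fun p r => p.2 + 1 < r.1) := by simp
          obtain ⟨g1, g2, g3⟩ := ih [q] hm1 hm2 (by intro r hr p hp; simp at hp; subst hp; exact hq_le r hr) hsorted_t
          refine ⟨g1, g2, fun x => ?_⟩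
          rw [g3 x]
          simp only [pcrCover, List.not_mem_nil, false_and, exists_false, false_or,
            List.mem_cons, or_false]
          constructor
          · rintro (⟨p, hp, hc⟩ | ⟨r, hr, hc⟩)
            · exact ⟨p, Or.inl hp, hc⟩
            · exact ⟨r, Or.inr hr, hc⟩
          · rintro ⟨r, (hre | hr), hc⟩
            · exact Or.inl ⟨r, hre, hc⟩
            · exact Or.inr ⟨r, hr, hc⟩
        · -- m = init ++ [lastp]
          rw [List.concat_eq_append] at hm
          subst hm
          obtain ⟨la, lb⟩ := lastp
          have hlast_mem : (la, lb) ∈ init ++ [(la, lb)] := by simp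
          have hla_lb : la ≤ lb := by simpa using h1 _ hlast_mem
          have hinit1 : ∀ p ∈ init, p.1 ≤ p.2 := fun p hp => h1 p (by simp [hp])
          have hpair := (List.pairwise_append.mp h2)
          have hinit2 : init.Pairwise (fun p r => p.2 + 1 < r.1) := hpair.1
          have hgap : ∀ p ∈ init, p.2 + 1 < la := by
            intro p hp; exact hpair.2.2 p hp (la, lb) (by simp)
          have hla_q : la ≤ q.1 := hstart q (List.mem_cons_self) (la, lb) hlast_mem
          have hgetLast : (init ++ [((la : Int), (lb : Int))]).getLast? = some (la, lb) := by
            simp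
          by_cases hadj : q.1 ≤ lb + 1
          · by_cases hext : lb < q.2
            · -- extend the last run
              have hstep : pcrStep (init ++ [(la, lb)]) q = init ++ [(la, q.2)] := by
                simp [pcrStep, show ¬ (q.2 < q.1) by omega, hgetLast, hadj, hext]
              rw [hstep]
              have hm1 : ∀ p ∈ init ++ [((la : Int), q.2)], p.1 ≤ p.2 := by
                intro p hp
                rcases List.mem_append.mp hp with hp | hp
                · exact hinit1 p hp
                · simp at hp; subst hp; simp; omega
              have hm2 : (init ++ [((la : Int), q.2)]).Pairwise (fun p r => p.2 + 1 < r.1) := by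
                rw [List.pairwise_append]
                exact ⟨hinit2, by simp, by intro p hp r hr; simp at hr; subst hr; simpa using hgap p hp⟩
              have hm3 : ∀ r ∈ t, ∀ p ∈ init ++ [((la : Int), q.2)], p.1 ≤ r.1 := by
                intro r hr p hp
                rcases List.mem_append.mp hp with hp | hp
                · exact hstart r (List.mem_cons_of_mem _ hr) p (by simp [hp])
                · simp at hp; subst hp
                  simpa using le_trans hla_q (hq_le r hr)
              obtain ⟨g1, g2, g3⟩ := ih _ hm1 hm2 hm3 hsorted_t
              refine ⟨g1, g2, fun x => ?_⟩
              rw [g3 x]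
              simp only [pcrCover, List.mem_append, List.mem_cons, List.not_mem_nil, or_false]
              constructor
              · rintro (⟨p, (hp | hpe), hc⟩ | ⟨r, hr, hc⟩)
                · exact Or.inl ⟨p, Or.inl hp, hc⟩
                · rw [hpe] at hc
                  by_cases hx : x ≤ lb
                  · exact Or.inl ⟨(la, lb), Or.inr rfl, by simp at hc ⊢; omega⟩
                  · exact Or.inr ⟨q, Or.inl rfl, by simp at hc; omega⟩
                · exact Or.inr ⟨r, Or.inr hr, hc⟩
              · rintro (⟨p, (hp | hpe), hc⟩ | ⟨r, (hre | hr), hc⟩)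
                · exact Or.inl ⟨p, Or.inl hp, hc⟩
                · rw [hpe] at hc
                  exact Or.inl ⟨(la, q.2), Or.inr rfl, by simp at hc ⊢; omega⟩
                · rw [hre] at hc
                  exact Or.inl ⟨(la, q.2), Or.inr rfl, by simp at hc ⊢; omega⟩
                · exact Or.inr ⟨r, hr, hc⟩
            · -- new interval contained in the last run: merged unchanged
              rw [not_lt] at hext
              have hstep : pcrStep (init ++ [(la, lb)]) q = init ++ [(la, lb)] := by
                simp [pcrStep, show ¬ (q.2 < q.1) by omega, hgetLast, hadj,
                  show ¬ (lb < q.2) by omega]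
              rw [hstep]
              obtain ⟨g1, g2, g3⟩ := ih _ h1 h2
                (fun r hr p hp => hstart r (List.mem_cons_of_mem _ hr) p hp) hsorted_t
              refine ⟨g1, g2, fun x => ?_⟩
              rw [g3 x]
              simp only [pcrCover, List.mem_append, List.mem_cons, List.not_mem_nil, or_false]
              constructor
              · rintro (h | ⟨r, hr, hc⟩)
                · exact Or.inl h
                · exact Or.inr ⟨r, Or.inr hr, hc⟩
              · rintro (h | ⟨r, (hre | hr), hc⟩)
                · exact Or.inl h
                · rw [hre] at hc
                  exact Or.inl ⟨(la, lb), Or.inr rfl, by simp at hc ⊢; omega⟩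
                · exact Or.inr ⟨r, hr, hc⟩
          · -- a gap: append a new run
            rw [not_le] at hadj
            have hstep : pcrStep (init ++ [(la, lb)]) q = (init ++ [(la, lb)]) ++ [q] := by
              simp [pcrStep, show ¬ (q.2 < q.1) by omega, hgetLast, show ¬ (q.1 ≤ lb + 1) by omega]
            rw [hstep]
            have hm1 : ∀ p ∈ (init ++ [((la : Int), lb)]) ++ [q], p.1 ≤ p.2 := by
              intro p hp
              rcases List.mem_append.mp hp with hp | hp
              · exact h1 p hp
              · simp at hp; subst hp; omega
            have hm2 : ((init ++ [((la : Int), lb)]) ++ [q]).Pairwise (fun p r => p.2 + 1 < r.1) := by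
              rw [List.pairwise_append]
              refine ⟨h2, by simp, ?_⟩
              intro p hp r hr
              simp at hr; subst hr
              rcases List.mem_append.mp hp with hp | hp
              · have := hgap p hp; omega
              · simp at hp; subst hp; simpa using hadj
            have hm3 : ∀ r ∈ t, ∀ p ∈ (init ++ [((la : Int), lb)]) ++ [q], p.1 ≤ r.1 := by
              intro r hr p hp
              rcases List.mem_append.mp hp with hp | hp
              · exact hstart r (List.mem_cons_of_mem _ hr) p hp
              · simp at hp; subst hp; exact hq_le r hr
            obtain ⟨g1, g2, g3⟩ := ih _ hm1 hm2 hm3 hsorted_t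
            refine ⟨g1, g2, fun x => ?_⟩
            rw [g3 x]
            simp only [pcrCover, List.mem_append, List.mem_cons, List.not_mem_nil, or_false]
            constructor
            · rintro (⟨p, ((hp | hpe) | hqe), hc⟩ | ⟨r, hr, hc⟩)
              · exact Or.inl ⟨p, Or.inl hp, hc⟩
              · exact Or.inl ⟨p, Or.inr hpe, hc⟩
              · rw [hqe] at hc
                exact Or.inr ⟨q, Or.inl rfl, hc⟩
              · exact Or.inr ⟨r, Or.inr hr, hc⟩
            · rintro (⟨p, hp, hc⟩ | ⟨r, (hre | hr), hc⟩)
              · exact Or.inl ⟨p, Or.inl hp, hc⟩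
              · rw [hre] at hc
                exact Or.inl ⟨q, Or.inr rfl, hc⟩
              · exact Or.inr ⟨r, hr, hc⟩

-- ===== expansion =====

theorem expand_eq_flatMap (m : List (Int × Int)) (acc : List Int) :
    m.foldl (fun res p => res ++ PySem.List.pyRange p.1 (p.2 + 1) 1) acc
      = acc ++ m.flatMap (fun p => PySem.List.pyRange p.1 (p.2 + 1) 1) := by
  induction m generalizing acc with
  | nil => simp
  | cons h t ih => simp [ih]

theorem expand_mem (m : List (Int × Int)) (x : Int) :
    x ∈ m.flatMap (fun p => PySem.List.pyRange p.1 (p.2 + 1) 1) ↔ pcrCover m x := by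
  simp only [List.mem_flatMap, PySem.List.mem_pyRange_one, pcrCover]
  constructor
  · rintro ⟨p, hp, h1, h2⟩; exact ⟨p, hp, h1, by omega⟩
  · rintro ⟨p, hp, h1, h2⟩; exact ⟨p, hp, h1, by omega⟩

theorem expand_pairwise (m : List (Int × Int))
    (hgap : m.Pairwise (fun p q => p.2 + 1 < q.1)) :
    (m.flatMap (fun p => PySem.List.pyRange p.1 (p.2 + 1) 1)).Pairwise (· < ·) := by
  induction m with
  | nil => simp
  | cons h t ih =>
      simp only [List.flatMap_cons]
      rw [List.pairwise_append]
      refine ⟨PySem.List.pairwise_lt_pyRange_one _ _, ih hgap.of_cons, ?_⟩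
      intro a ha b hb
      rw [PySem.List.mem_pyRange_one] at ha
      rw [List.mem_flatMap] at hb
      obtain ⟨p, hp, hbp⟩ := hb
      rw [PySem.List.mem_pyRange_one] at hbp
      have := List.rel_of_pairwise_cons hgap hp
      omega


theorem final_eq (s : String) : parse_char_ranges s = parse_char_ranges_alt s := by
  have hA : parse_char_ranges s =
      PySem.List.sorted (((PySem.Str.split? s ",").getD []).foldl stepA PySem.Set.empty)
        (fun x => x) false := rfl
  have hB : parse_char_ranges_alt s =
      ((PySem.List.sorted (pcrParse s) (fun t => t.1) false).foldl pcrStep []).foldl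
        (fun res p => res ++ PySem.List.pyRange p.1 (p.2 + 1) 1) [] := rfl
  rw [hA, hB]
  set parts := (PySem.Str.split? s ",").getD [] with hparts
  set ivs := PySem.List.sorted (pcrParse s) (fun t => t.1) false with hivs
  have hsorted : ivs.Pairwise (fun p q => p.1 ≤ q.1) :=
    PySem.List.sorted_pairwise (pcrParse s) (fun t => t.1)
  obtain ⟨g1, g2, g3⟩ := merge_inv ivs [] (by simp) (by simp) (by simp) hsorted
  set merged := ivs.foldl pcrStep [] with hmerged
  rw [expand_eq_flatMap]
  set E := merged.flatMap (fun p => PySem.List.pyRange p.1 (p.2 + 1) 1) with hE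
  have hEpair : E.Pairwise (· < ·) := expand_pairwise merged g2
  have hEnodup : E.Nodup := hEpair.imp (fun h => ne_of_lt h)
  set Aset := parts.foldl stepA PySem.Set.empty with hAset
  have hAnodup : Aset.Nodup := aset_nodup parts PySem.Set.empty List.nodup_nil
  have hmem : ∀ x : Int, x ∈ E ↔ x ∈ Aset := by
    intro x
    rw [hE, expand_mem, g3 x, hAset, aset_mem]
    simp only [pcrCover, List.not_mem_nil, false_and, exists_false, false_or]
    constructor
    · rintro ⟨q, hq, hc⟩
      rw [hivs, PySem.List.mem_sorted, pcrParse_eq_map, List.mem_map] at hq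
      obtain ⟨part, hpart, rfl⟩ := hq
      exact Or.inr ⟨part, hpart, hc⟩
    · rintro (h | ⟨part, hpart, hc⟩)
      · cases h
      · refine ⟨ivOf part, ?_, hc⟩
        rw [hivs, PySem.List.mem_sorted, pcrParse_eq_map, List.mem_map]
        exact ⟨part, hpart, rfl⟩
  have hperm : E.Perm Aset := (List.perm_ext_iff_of_nodup hEnodup hAnodup).mpr hmem
  rw [List.nil_append]
  exact PySem.List.sorted_eq_of_perm_of_pairwise_lt Aset E _ hperm hEpair

-- ===== VERDICT (by name: the statement is the Claim_ definition above) =====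
theorem parse_char_ranges_spec : Claim_equal_parse_char_ranges := by
  intro s _ _
  unfold Spec_parse_char_ranges
  exact final_eq s
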